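-- pv_equiv track=rewrite | github.com/pce/sdlos | tooling/src/sdlos/features/docblocks.py | _lookup_param
-- ===== SOURCE A (Python) =====
-- def _lookup_param(name_lower: str, taxonomy: dict[str, str]) -> str:
--     """Longest-key substring match for a parameter name in *taxonomy*.
--
--     Parameters
--     ----------
--     name_lower:
--         Lower-cased parameter name.
--     taxonomy:
--         ``param_taxonomy`` dict from the knowledge pack.
--
--     Returns
--     -------
--     str
--         Matched description or an empty string when no match is found.
--     """
--     best_key  = ""
--     best_desc = ""
--     for key, desc in taxonomy.items():
--         k = key.lower()
--         if k in name_lower and len(k) > len(best_key):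
--             best_key  = k
--             best_desc = desc
--     return best_desc
-- ===== SOURCE B (Python) =====
-- def _lookup_param(name_lower: str, taxonomy: dict[str, str]) -> str:
--     """Longest-key substring match, by a different decomposition:
--     collect the matching (lowered key, desc) pairs, take the maximal
--     key length, and return the first description at that length."""
--     matches = [(k.lower(), desc) for k, desc in taxonomy.items()
--                if k.lower() and k.lower() in name_lower]
--     if not matches:
--         return ""
--     top = max(len(k) for k, _ in matches)
--     return next(desc for k, desc in matches if len(k) == top)
-- ===== Notes on version B (the rewrite author's own statement) =====
-- stated objective: alternative
-- what changed: A's single best-so-far accumulator pass is replaced by a filter/max/first-at-max decomposition: collect the matching lowered keys, compute the maximal key length, and return the first description at that length.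
import Mathlib
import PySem

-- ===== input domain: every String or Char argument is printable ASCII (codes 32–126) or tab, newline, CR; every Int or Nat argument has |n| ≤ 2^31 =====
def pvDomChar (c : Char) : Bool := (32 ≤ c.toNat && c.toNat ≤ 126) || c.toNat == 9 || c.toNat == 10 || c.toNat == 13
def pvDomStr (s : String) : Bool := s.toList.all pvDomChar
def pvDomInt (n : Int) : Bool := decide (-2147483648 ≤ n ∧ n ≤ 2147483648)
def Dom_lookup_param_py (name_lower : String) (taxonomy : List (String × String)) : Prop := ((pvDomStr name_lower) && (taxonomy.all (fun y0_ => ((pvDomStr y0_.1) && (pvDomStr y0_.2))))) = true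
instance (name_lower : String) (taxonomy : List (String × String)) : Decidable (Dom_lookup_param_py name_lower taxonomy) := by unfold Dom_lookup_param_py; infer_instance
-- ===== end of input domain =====

-- B replaces A's best-so-far accumulator pass with a filter / max-length / first-at-max
-- decomposition (objective: alternative, same cost; equal return values proved below).


-- ===== PORT A =====
def lookup_param_py (name_lower : String) (taxonomy : List (String × String)) : String :=
  (taxonomy.foldl
    (fun (b : String × String) kd =>
      if PySem.Str.isIn (PySem.Str.lower kd.1) name_lower = true ∧
          PySem.Str.len (PySem.Str.lower kd.1) > PySem.Str.len b.1
      then (PySem.Str.lower kd.1, kd.2) else b)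
    ("", "")).2

-- ===== PORT B =====
def lookup_param_py_alt (name_lower : String) (taxonomy : List (String × String)) : String :=
  match taxonomy.filterMap
    (fun kd =>
      if PySem.Str.lower kd.1 ≠ "" ∧ PySem.Str.isIn (PySem.Str.lower kd.1) name_lower = true
      then some (PySem.Str.lower kd.1, kd.2) else none) with
  | [] => ""
  | ms =>
    match PySem.List.max? (ms.map (fun m => PySem.Str.len m.1)) (fun x => x) with
    | none => ""
    | some top =>
      match ms.find? (fun m => PySem.Str.len m.1 == top) with
      | some m => m.2
      | none => ""

-- ===== PRECONDITION & SPEC =====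
def Spec_lookup_param_py (name_lower : String) (taxonomy : List (String × String)) (out : String) : Prop := out = lookup_param_py_alt name_lower taxonomy
instance (name_lower : String) (taxonomy : List (String × String)) (out : String) : Decidable (Spec_lookup_param_py name_lower taxonomy out) := by unfold Spec_lookup_param_py; infer_instance

-- ===== CLAIM (what is proved, stated in full; the proofs are below) =====
def Claim_equal_lookup_param_py : Prop := ∀ (name_lower : String) (taxonomy : List (String × String)), Dom_lookup_param_py name_lower taxonomy → Spec_lookup_param_py name_lower taxonomy (lookup_param_py name_lower taxonomy)

-- ===== LEMMAS AND PROOFS =====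

-- the matching pairs B collects (lowered key, description)
def pvMatches (name_lower : String) (taxonomy : List (String × String)) : List (String × String) :=
  taxonomy.filterMap
    (fun kd =>
      if PySem.Str.lower kd.1 ≠ "" ∧ PySem.Str.isIn (PySem.Str.lower kd.1) name_lower = true
      then some (PySem.Str.lower kd.1, kd.2) else none)

-- A's "keep the longer key" step, restricted to the matches, with Nat lengths
def pvStep (b m : String × String) : String × String :=
  if m.1.length > b.1.length then m else b

-- maximal lowered-key length among the matches
def pvMaxLen (ms : List (String × String)) : Nat :=
  ms.foldr (fun m a => max m.1.length a) 0

theorem pvMaxLen_cons (m : String × String) (t : List (String × String)) :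
    pvMaxLen (m :: t) = max m.1.length (pvMaxLen t) := rfl

theorem pvStrLen (s : String) : PySem.Str.len s = (s.length : Int) := by
  rw [PySem.Str.len_eq, String.length_toList]

-- A's fold over the whole taxonomy equals the pvStep fold over just the matches
theorem pvFold_eq_matches (name_lower : String) (taxonomy : List (String × String))
    (b : String × String) :
    taxonomy.foldl
      (fun (b : String × String) kd =>
        if PySem.Str.isIn (PySem.Str.lower kd.1) name_lower = true ∧
            PySem.Str.len (PySem.Str.lower kd.1) > PySem.Str.len b.1
        then (PySem.Str.lower kd.1, kd.2) else b)
      b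
    = (pvMatches name_lower taxonomy).foldl pvStep b := by
  induction taxonomy generalizing b with
  | nil => rfl
  | cons kd t ih =>
    rw [List.foldl_cons]
    by_cases hc : (PySem.Str.lower kd.1 ≠ "" ∧
        PySem.Str.isIn (PySem.Str.lower kd.1) name_lower = true)
    · have hmt : pvMatches name_lower (kd :: t)
          = (PySem.Str.lower kd.1, kd.2) :: pvMatches name_lower t := by
        unfold pvMatches
        rw [List.filterMap_cons, if_pos hc]
      have hlen : (PySem.Str.len (PySem.Str.lower kd.1) > PySem.Str.len b.1) ↔
          (b.1.length < (PySem.Str.lower kd.1).length) := by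
        rw [pvStrLen, pvStrLen]
        exact Nat.cast_lt
      have hstep : (if PySem.Str.isIn (PySem.Str.lower kd.1) name_lower = true ∧
            PySem.Str.len (PySem.Str.lower kd.1) > PySem.Str.len b.1
          then (PySem.Str.lower kd.1, kd.2) else b)
          = pvStep b (PySem.Str.lower kd.1, kd.2) := by
        by_cases h2 : b.1.length < (PySem.Str.lower kd.1).length
        · rw [if_pos ⟨hc.2, hlen.mpr h2⟩, pvStep, if_pos h2]
        · rw [if_neg (fun hh => h2 (hlen.mp hh.2)), pvStep, if_neg h2]
      rw [hstep, hmt, List.foldl_cons, ih]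
    · have hmt : pvMatches name_lower (kd :: t) = pvMatches name_lower t := by
        unfold pvMatches
        rw [List.filterMap_cons, if_neg hc]
      have hstep : (if PySem.Str.isIn (PySem.Str.lower kd.1) name_lower = true ∧
            PySem.Str.len (PySem.Str.lower kd.1) > PySem.Str.len b.1
          then (PySem.Str.lower kd.1, kd.2) else b) = b := by
        by_cases h1 : PySem.Str.isIn (PySem.Str.lower kd.1) name_lower = true
        · have h0 : PySem.Str.lower kd.1 = "" := by
            by_contra hh; exact hc ⟨hh, h1⟩
          rw [if_neg]
          rintro ⟨-, hlt⟩
          rw [pvStrLen, pvStrLen, h0] at hlt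
          simp at hlt
          omega
        · rw [if_neg]; rintro ⟨hh, -⟩; exact h1 hh
      rw [hstep, hmt, ih]

-- the maximal length is attained by some element
theorem pvMaxLen_attained (ms : List (String × String)) (h : ms ≠ []) :
    ∃ x ∈ ms, (x.1.length == pvMaxLen ms) = true := by
  induction ms with
  | nil => exact absurd rfl h
  | cons m t ih =>
    rw [pvMaxLen_cons]
    by_cases hm : pvMaxLen t ≤ m.1.length
    · refine ⟨m, List.mem_cons_self, ?_⟩
      simp only [beq_iff_eq]
      omega
    · have ht : t ≠ [] := by
        rintro rfl
        simp [pvMaxLen] at hm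
      obtain ⟨x, hx, hxe⟩ := ih ht
      refine ⟨x, List.mem_cons_of_mem _ hx, ?_⟩
      simp only [beq_iff_eq] at hxe ⊢
      omega

-- characterisation of the pvStep fold: first element of maximal length, unless the
-- accumulator's key is at least as long as every match
theorem pvFold_char (ms : List (String × String)) (b : String × String) :
    ms.foldl pvStep b
    = if pvMaxLen ms > b.1.length
      then (ms.find? (fun m => m.1.length == pvMaxLen ms)).getD b
      else b := by
  induction ms generalizing b with
  | nil => simp [pvMaxLen]
  | cons m t ih =>
    rw [List.foldl_cons, pvMaxLen_cons]
    by_cases h : b.1.length < m.1.length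
    · have hstep : pvStep b m = m := by rw [pvStep, if_pos h]
      rw [hstep, ih m]
      by_cases hc : m.1.length < pvMaxLen t
      · have hmax : max m.1.length (pvMaxLen t) = pvMaxLen t := by omega
        rw [hmax]
        have ht : t ≠ [] := by
          rintro rfl
          simp [pvMaxLen] at hc
        obtain ⟨x, hx, hxe⟩ := pvMaxLen_attained t ht
        obtain ⟨y, hy⟩ := Option.isSome_iff_exists.mp
          ((List.find?_isSome
            (xs := t) (p := fun z => z.1.length == pvMaxLen t)).mpr ⟨x, hx, hxe⟩)
        have hne : ¬ ((m.1.length == pvMaxLen t) = true) := by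
          simp only [beq_iff_eq]
          omega
        rw [if_pos hc, if_pos (by omega),
          List.find?_cons_of_neg (p := fun z : String × String => z.1.length == pvMaxLen t)
            (a := m) (l := t) hne, hy]
        rfl
      · have hmax : max m.1.length (pvMaxLen t) = m.1.length := by omega
        rw [if_neg (by omega), hmax, if_pos h,
          List.find?_cons_of_pos (p := fun z : String × String => z.1.length == m.1.length)
            (a := m) (l := t) (by simp)]
        rfl
    · have hstep : pvStep b m = b := by rw [pvStep, if_neg h]
      rw [hstep, ih b]
      by_cases hc : b.1.length < pvMaxLen t
      · have hmax : max m.1.length (pvMaxLen t) = pvMaxLen t := by omega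
        have hne : ¬ ((m.1.length == pvMaxLen t) = true) := by
          simp only [beq_iff_eq]
          omega
        rw [if_pos hc, hmax, if_pos hc,
          List.find?_cons_of_neg (p := fun z : String × String => z.1.length == pvMaxLen t)
            (a := m) (l := t) hne]
      · rw [if_neg hc, if_neg (by omega)]

-- casting the Int running max down to Nat
theorem pvFoldlMaxCast (ns : List Nat) (a : Nat) :
    List.foldl max (a : Int) (ns.map (fun n : Nat => (n : Int)))
    = ((ns.foldl max a : Nat) : Int) := by
  induction ns generalizing a with
  | nil => rfl
  | cons k t ih =>
    simp only [List.map_cons, List.foldl_cons]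
    rw [← Nat.cast_max, ih]

-- running max from the left = max of the start and the foldr maximum
theorem pvFoldlMaxFoldr (ns : List Nat) (a : Nat) :
    ns.foldl max a = max a (ns.foldr max 0) := by
  induction ns generalizing a with
  | nil => simp
  | cons n t ih =>
    rw [List.foldl_cons, List.foldr_cons, ih]
    omega

theorem pvMaxLen_eq_foldr_map (ms : List (String × String)) :
    pvMaxLen ms = (ms.map (fun m => m.1.length)).foldr max 0 := by
  induction ms with
  | nil => rfl
  | cons m t ih => rw [pvMaxLen_cons, List.map_cons, List.foldr_cons, ih]

-- every match has a nonempty key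
theorem pvMatches_len_pos (name_lower : String) (taxonomy : List (String × String))
    (m : String × String) (hm : m ∈ pvMatches name_lower taxonomy) :
    1 ≤ m.1.length := by
  rcases List.mem_filterMap.mp hm with ⟨kd, -, hf⟩
  by_cases hc : (PySem.Str.lower kd.1 ≠ "" ∧
      PySem.Str.isIn (PySem.Str.lower kd.1) name_lower = true)
  · rw [if_pos hc] at hf
    cases hf
    have hne : (PySem.Str.lower kd.1).toList ≠ [] :=
      fun hn => hc.1 (String.toList_eq_nil_iff.mp hn)
    have := List.length_pos_of_ne_nil hne
    rw [String.length_toList] at this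
    exact this
  · rw [if_neg hc] at hf; cases hf

-- ===== VERDICT (by name: the statement is the Claim_ definition above) =====
theorem lookup_param_py_spec : Claim_equal_lookup_param_py := by
  unfold Claim_equal_lookup_param_py
  intro nl tax _
  unfold Spec_lookup_param_py
  have hA : lookup_param_py nl tax = (List.foldl pvStep ("", "") (pvMatches nl tax)).2 := by
    unfold lookup_param_py
    rw [pvFold_eq_matches]
  rw [hA]
  have hB : lookup_param_py_alt nl tax
      = (match pvMatches nl tax with
        | [] => ""
        | ms =>
          match PySem.List.max? (ms.map (fun m => PySem.Str.len m.1)) (fun x => x) with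
          | none => ""
          | some top =>
            match ms.find? (fun m => PySem.Str.len m.1 == top) with
            | some m => m.2
            | none => "") := rfl
  rw [hB]
  cases h : pvMatches nl tax with
  | nil =>
    rw [pvFold_char]
    simp [pvMaxLen]
  | cons m t =>
    have hmem : m ∈ pvMatches nl tax := by rw [h]; exact List.mem_cons_self
    have h1 : 1 ≤ m.1.length := pvMatches_len_pos nl tax m hmem
    have hpos : 0 < pvMaxLen (m :: t) := by
      rw [pvMaxLen_cons]; omega
    have hmap : (m :: t).map (fun m => PySem.Str.len m.1)
        = ((m :: t).map (fun m => m.1.length)).map (fun n : Nat => (n : Int)) := by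
      rw [List.map_map]
      exact List.map_congr_left (fun x _ => pvStrLen x.1)
    have htop : PySem.List.max? ((m :: t).map (fun m => PySem.Str.len m.1)) (fun x => x)
        = some ((pvMaxLen (m :: t) : Nat) : Int) := by
      rw [hmap, List.map_cons, List.map_cons, PySem.List.max?_id_cons,
        pvFoldlMaxCast, pvFoldlMaxFoldr, pvMaxLen_eq_foldr_map, List.map_cons,
        List.foldr_cons]
    have hpred : (fun z : String × String =>
          PySem.Str.len z.1 == ((pvMaxLen (m :: t) : Nat) : Int))
        = (fun z : String × String => z.1.length == pvMaxLen (m :: t)) := by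
      funext z
      by_cases hz : z.1.length = pvMaxLen (m :: t)
      · simp [hz]
      · simp [hz]
    obtain ⟨x, hx, hxe⟩ := pvMaxLen_attained (m :: t) (List.cons_ne_nil _ _)
    obtain ⟨y, hy⟩ := Option.isSome_iff_exists.mp
      ((List.find?_isSome
        (xs := m :: t) (p := fun z => z.1.length == pvMaxLen (m :: t))).mpr ⟨x, hx, hxe⟩)
    rw [pvFold_char, if_pos (by simpa using hpos), hy]
    simp only [htop, hpred, hy]
    rfl
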